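-- pv_equiv track=rewrite | github.com/adarshram514/Software-Engineering | grab_data_from_api.py | parse_json_object
-- ===== SOURCE A (Python) =====
-- def parse_json_object(json_object,selected_headers):
--     """
--         This will return a list of dictonaries with only the seleted headers for the users.
--     """
--     parsed_data = []
--     for object in json_object['data']:
--         parsed_object = {}
--         for header in selected_headers:
--             if header in object:
--                 parsed_object[header] = object[header]
--         parsed_data.append(parsed_object)
--     return parsed_data
-- ===== SOURCE B (Python) =====
-- def parse_json_object(json_object, selected_headers):
--     # Column-major: start from one empty record per data row, then for each
--     # (deduplicated) header rebuild the whole result list in one zip pass,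
--     # extending exactly the records that contain that header.
--     data = json_object['data']
--     result = [{} for _ in data]
--     for h in dict.fromkeys(selected_headers):
--         result = [{**d, h: obj[h]} if h in obj else d
--                   for d, obj in zip(result, data)]
--     return result
-- ===== Notes on version B (the rewrite author's own statement) =====
-- stated objective: alternative
-- what changed: B inverts the loop nesting: instead of A's row-major pass that builds each record's dict by scanning the header list, B goes column-major, folding over the deduplicated headers and rebuilding the whole result list per header with a single zip pass over the records.
import Mathlib
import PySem

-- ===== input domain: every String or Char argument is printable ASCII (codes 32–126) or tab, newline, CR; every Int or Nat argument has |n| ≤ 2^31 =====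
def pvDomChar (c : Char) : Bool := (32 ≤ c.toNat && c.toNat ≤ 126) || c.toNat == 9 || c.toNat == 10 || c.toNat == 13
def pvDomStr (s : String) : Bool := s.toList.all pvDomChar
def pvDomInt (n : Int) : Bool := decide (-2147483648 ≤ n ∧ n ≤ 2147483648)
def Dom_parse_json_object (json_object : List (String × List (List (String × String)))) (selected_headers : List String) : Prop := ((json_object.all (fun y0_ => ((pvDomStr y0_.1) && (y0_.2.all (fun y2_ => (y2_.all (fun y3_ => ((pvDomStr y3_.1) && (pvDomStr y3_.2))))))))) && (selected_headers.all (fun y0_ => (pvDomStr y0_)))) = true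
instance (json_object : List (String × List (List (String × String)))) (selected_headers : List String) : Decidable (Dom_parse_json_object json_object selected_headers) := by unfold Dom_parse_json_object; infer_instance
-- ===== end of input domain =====

-- B inverts the loop nesting: a column-major fold over the deduplicated headers,
-- rebuilding the whole record list per header in one zip pass, instead of A's
-- row-major per-record dict built by scanning the header list (objective: alternative).

-- ===== PORT A =====
-- Python dict lookup on an association list: first match (exact for the dicts here).
def pvLookup {α : Type} : List (String × α) → String → Option α
  | [], _ => none
  | (k, v) :: t, h => if k = h then some v else pvLookup t h

-- Python `d[k] = v`: overwrite in place if present, else append (exact dict semantics).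
def pvInsert : List (String × String) → String → String → List (String × String)
  | [], h, v => [(h, v)]
  | (k, w) :: t, h, v => if k = h then (k, v) :: t else (k, w) :: pvInsert t h v

def parse_json_object (json_object : List (String × List (List (String × String)))) (selected_headers : List String) : List (List (String × String)) :=
  match pvLookup json_object "data" with
  | none => []  -- json_object['data'] raises KeyError: excluded by Pre_
  | some data =>
    data.foldl (fun parsed_data obj =>
      parsed_data ++ [selected_headers.foldl (fun parsed_object header =>
        match pvLookup obj header with
        | some v => pvInsert parsed_object header v   -- `if header in object: parsed_object[header] = object[header]`
        | none => parsed_object) []]) []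

-- ===== PORT B =====
-- list(dict.fromkeys(selected_headers)): first-occurrence dedup, carrying the seen set.
def pvDedup (seen : List String) : List String → List String
  | [] => []
  | h :: t => if h ∈ seen then pvDedup seen t else h :: pvDedup (h :: seen) t

-- `{**d, h: obj[h]} if h in obj else d`: one column cell; `{**d, h: v}` keeps an
-- existing key's position and overwrites its value, i.e. exactly pvInsert.
def pvColUpdate (h : String) (d : List (String × String)) (obj : List (String × String)) : List (String × String) :=
  match pvLookup obj h with
  | some v => pvInsert d h v
  | none => d

def parse_json_object_alt (json_object : List (String × List (List (String × String)))) (selected_headers : List String) : List (List (String × String)) :=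
  match pvLookup json_object "data" with
  | none => []  -- json_object['data'] raises KeyError: excluded by Pre_
  | some data =>
    (pvDedup [] selected_headers).foldl
      (fun result h => List.zipWith (pvColUpdate h) result data)
      (data.map (fun _ => ([] : List (String × String))))

-- ===== PRECONDITION & SPEC =====
-- Pre_ excludes exactly the inputs where json_object has no "data" key, on which both A and B raise KeyError.
def Pre_parse_json_object (json_object : List (String × List (List (String × String)))) (selected_headers : List String) : Prop :=
  "data" ∈ json_object.map Prod.fst
instance (json_object : List (String × List (List (String × String)))) (selected_headers : List String) : Decidable (Pre_parse_json_object json_object selected_headers) := by unfold Pre_parse_json_object; infer_instance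
def pvWitness_parse_json_object : (List (String × List (List (String × String)))) × List String :=
  ([("data", [[("a", "1"), ("b", "2")], [("c", "3")]])], ["a", "c", "a"])

def Spec_parse_json_object (json_object : List (String × List (List (String × String)))) (selected_headers : List String) (out : List (List (String × String))) : Prop := out = parse_json_object_alt json_object selected_headers
instance (json_object : List (String × List (List (String × String)))) (selected_headers : List String) (out : List (List (String × String))) : Decidable (Spec_parse_json_object json_object selected_headers out) := by unfold Spec_parse_json_object; infer_instance

-- ===== CLAIM (what is proved, stated in full; the proofs are below) =====
def Claim_equal_parse_json_object : Prop := ∀ (json_object : List (String × List (List (String × String)))) (selected_headers : List String), Dom_parse_json_object json_object selected_headers → Pre_parse_json_object json_object selected_headers → Spec_parse_json_object json_object selected_headers (parse_json_object json_object selected_headers)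

-- ===== LEMMAS AND PROOFS =====

def pvPickOne (obj : List (String × String)) (h : String) : Option (String × String) :=
  (pvLookup obj h).map (fun v => (h, v))

theorem pvLookup_eq_none_iff {α : Type} (l : List (String × α)) (h : String) :
    pvLookup l h = none ↔ h ∉ l.map Prod.fst := by
  induction l with
  | nil => simp [pvLookup]
  | cons p t ih =>
    obtain ⟨k, v⟩ := p
    by_cases hk : k = h <;> simp [pvLookup, hk, ih, Ne.symm, eq_comm]

theorem pvLookup_append {α : Type} (l₁ l₂ : List (String × α)) (h : String) :
    pvLookup (l₁ ++ l₂) h = ((pvLookup l₁ h).rec (pvLookup l₂ h) (fun v => some v)) := by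
  induction l₁ with
  | nil => simp [pvLookup]
  | cons p t ih =>
    obtain ⟨k, v⟩ := p
    by_cases hk : k = h <;> simp [pvLookup, hk, ih]

theorem pvInsert_of_lookup_some (acc : List (String × String)) (h v : String)
    (hl : pvLookup acc h = some v) : pvInsert acc h v = acc := by
  induction acc with
  | nil => simp [pvLookup] at hl
  | cons p t ih =>
    obtain ⟨k, w⟩ := p
    by_cases hk : k = h
    · simp [pvLookup, hk] at hl
      simp [pvInsert, hk, hl]
    · simp [pvLookup, hk] at hl
      simp [pvInsert, hk, ih hl]

theorem pvInsert_of_lookup_none (acc : List (String × String)) (h v : String)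
    (hl : pvLookup acc h = none) : pvInsert acc h v = acc ++ [(h, v)] := by
  induction acc with
  | nil => simp [pvInsert]
  | cons p t ih =>
    obtain ⟨k, w⟩ := p
    by_cases hk : k = h
    · simp [pvLookup, hk] at hl
    · simp [pvLookup, hk] at hl
      simp [pvInsert, hk, ih hl]

theorem pvDedup_congr (s₁ s₂ : List String) (t : List String)
    (hm : ∀ x, x ∈ s₁ ↔ x ∈ s₂) : pvDedup s₁ t = pvDedup s₂ t := by
  induction t generalizing s₁ s₂ with
  | nil => rfl
  | cons h t ih =>
    by_cases hh : h ∈ s₁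
    · simp [pvDedup, hh, (hm h).1 hh, ih _ _ hm]
    · have hh₂ : h ∉ s₂ := fun c => hh ((hm h).2 c)
      simp only [pvDedup, if_neg hh, if_neg hh₂]
      exact congrArg (h :: ·) (ih _ _ (by intro x; simp [hm x]))

theorem pvDedup_idem (seen t : List String) :
    pvDedup seen (pvDedup seen t) = pvDedup seen t := by
  induction t generalizing seen with
  | nil => rfl
  | cons h t ih =>
    by_cases hh : h ∈ seen
    · simp [pvDedup, hh, ih]
    · have e1 : pvDedup seen (h :: t) = h :: pvDedup (h :: seen) t := by
        simp [pvDedup, hh]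
      have e2 : pvDedup seen (h :: pvDedup (h :: seen) t)
          = h :: pvDedup (h :: seen) (pvDedup (h :: seen) t) := by
        simp [pvDedup, hh]
      rw [e1, e2, ih (h :: seen)]

theorem filterMap_pvDedup_of_none (obj : List (String × String)) (h : String)
    (hn : pvLookup obj h = none) (t : List String) (seen : List String) :
    List.filterMap (pvPickOne obj) (pvDedup (h :: seen) t)
      = List.filterMap (pvPickOne obj) (pvDedup seen t) := by
  induction t generalizing seen with
  | nil => rfl
  | cons h' t ih =>
    by_cases he : h' = h
    · subst he
      by_cases hs : h' ∈ seen
      · simp only [pvDedup, if_pos (List.mem_cons_of_mem _ hs), if_pos hs]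
        exact ih seen
      · simp only [pvDedup, if_pos (List.mem_cons_self), if_neg hs,
          List.filterMap_cons, pvPickOne, hn, Option.map_none]
    · by_cases hs : h' ∈ seen
      · simp only [pvDedup, if_pos (List.mem_cons_of_mem _ hs), if_pos hs]
        exact ih seen
      · have hs' : h' ∉ h :: seen := by simp [he, hs]
        simp only [pvDedup, if_neg hs', if_neg hs, List.filterMap_cons]
        have hcongr : pvDedup (h' :: h :: seen) t = pvDedup (h :: h' :: seen) t :=
          pvDedup_congr _ _ _ (by intro x; simp; tauto)
        rw [hcongr, ih (h' :: seen)]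

theorem inner_loop_eq (obj : List (String × String)) (sh : List String)
    (acc : List (String × String))
    (H : ∀ k v, pvLookup acc k = some v → pvLookup obj k = some v) :
    sh.foldl (fun parsed_object header =>
        match pvLookup obj header with
        | some v => pvInsert parsed_object header v
        | none => parsed_object) acc
      = acc ++ List.filterMap (pvPickOne obj) (pvDedup (acc.map Prod.fst) sh) := by
  induction sh generalizing acc with
  | nil => simp [pvDedup]
  | cons h t ih =>
    by_cases hmem : h ∈ acc.map Prod.fst
    · have hsome : ∃ v, pvLookup acc h = some v := by
        cases hv : pvLookup acc h with
        | none => exact absurd ((pvLookup_eq_none_iff acc h).1 hv) (by simpa using hmem)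
        | some v => exact ⟨v, rfl⟩
      obtain ⟨v, hv⟩ := hsome
      have hobj : pvLookup obj h = some v := H _ _ hv
      simp only [List.foldl_cons, hobj, pvInsert_of_lookup_some acc h v hv,
        pvDedup, if_pos hmem]
      exact ih acc H
    · cases hobj : pvLookup obj h with
      | some v =>
        have hln : pvLookup acc h = none := (pvLookup_eq_none_iff acc h).2 hmem
        have H' : ∀ k w, pvLookup (acc ++ [(h, v)]) k = some w → pvLookup obj k = some w := by
          intro k w hk
          rw [pvLookup_append] at hk
          cases hak : pvLookup acc k with
          | some u => rw [hak] at hk; exact hk ▸ H _ _ hak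
          | none =>
            rw [hak] at hk
            by_cases hkh : h = k
            · simp [pvLookup, hkh] at hk
              subst hkh; exact hk ▸ hobj
            · simp [pvLookup, hkh] at hk
        have step := ih (acc ++ [(h, v)]) H'
        have hkeys : pvDedup ((acc ++ [(h, v)]).map Prod.fst) t
            = pvDedup (h :: acc.map Prod.fst) t :=
          pvDedup_congr _ _ _ (by intro x; simp; tauto)
        simp only [List.foldl_cons, hobj, pvInsert_of_lookup_none acc h v hln,
          pvDedup, if_neg hmem, List.filterMap_cons, pvPickOne, Option.map_some]
        rw [step, hkeys, List.append_assoc]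
        rfl
      | none =>
        have hnone : pvPickOne obj h = none := by simp [pvPickOne, hobj]
        simp only [List.foldl_cons, hobj, pvDedup, if_neg hmem, List.filterMap_cons, hnone]
        rw [filterMap_pvDedup_of_none obj h hobj t (acc.map Prod.fst)]
        exact ih acc H

theorem zipWith_map_self {α β : Type} (f : β → α → β) (g : α → β) (l : List α) :
    List.zipWith f (l.map g) l = l.map (fun o => f (g o) o) := by
  induction l with
  | nil => rfl
  | cons x t ih => simp [ih]

theorem colfold_eq_map (data : List (List (String × String))) (hs : List String)
    (g : List (String × String) → List (String × String)) :
    hs.foldl (fun result h => List.zipWith (pvColUpdate h) result data) (data.map g)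
      = data.map (fun o => hs.foldl (fun d h => pvColUpdate h d o) (g o)) := by
  induction hs generalizing g with
  | nil => simp
  | cons h t ih =>
    simp only [List.foldl_cons]
    rw [zipWith_map_self (pvColUpdate h) g data, ih]

theorem foldl_append_singleton {α β : Type} (f : α → β) (l : List α) (acc : List β) :
    l.foldl (fun a x => a ++ [f x]) acc = acc ++ l.map f := by
  induction l generalizing acc with
  | nil => simp
  | cons x t ih => simp [ih]

-- per-record value of B's column fold: A's inner loop over the deduped headers
theorem record_eq (obj : List (String × String)) (sh : List String) :
    (pvDedup [] sh).foldl (fun d h => pvColUpdate h d obj) []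
      = List.filterMap (pvPickOne obj) (pvDedup [] sh) := by
  have h1 := inner_loop_eq obj (pvDedup [] sh) []
    (by intro k v hv; simp [pvLookup] at hv)
  simp only [List.nil_append, List.map_nil] at h1
  rw [pvDedup_idem] at h1
  calc (pvDedup [] sh).foldl (fun d h => pvColUpdate h d obj) []
      = (pvDedup [] sh).foldl (fun parsed_object header =>
          match pvLookup obj header with
          | some v => pvInsert parsed_object header v
          | none => parsed_object) [] := by
        simp only [pvColUpdate]
    _ = List.filterMap (pvPickOne obj) (pvDedup [] sh) := h1

-- ===== VERDICT (by name: the statement is the Claim_ definition above) =====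
theorem parse_json_object_spec : Claim_equal_parse_json_object := by
  intro json_object selected_headers _ _
  unfold Spec_parse_json_object parse_json_object parse_json_object_alt
  cases hd : pvLookup json_object "data" with
  | none => rfl
  | some data =>
    simp only []
    rw [foldl_append_singleton
      (fun obj => selected_headers.foldl (fun parsed_object header =>
        match pvLookup obj header with
        | some v => pvInsert parsed_object header v
        | none => parsed_object) []) data [],
      colfold_eq_map data (pvDedup [] selected_headers) (fun _ => [])]
    simp only [List.nil_append]
    apply List.map_congr_left
    intro obj _
    rw [inner_loop_eq obj selected_headers [] (by intro k v hv; simp [pvLookup] at hv),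
      record_eq]
    rfl
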